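-- pv_equiv track=rewrite | github.com/GammA-su/v16 | src/eidolon_v16/bvps/enumerate.py | _depth_triples
-- ===== SOURCE A (Python) =====
-- def _depth_triples(depth: int) -> list[tuple[int, int, int]]:
--     triples: list[tuple[int, int, int]] = []
--     for cond_depth in range(depth):
--         for then_depth in range(depth):
--             for else_depth in range(depth):
--                 if max(cond_depth, then_depth, else_depth) != depth - 1:
--                     continue
--                 triples.append((cond_depth, then_depth, else_depth))
--     return sorted(
--         triples,
--         key=lambda triple: (
--             triple[0] + triple[1] + triple[2],
--             triple[0] != depth - 1,
--             triple[1] != depth - 1,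
--             triple[2] != depth - 1,
--             triple[0],
--             triple[1],
--             triple[2],
--         ),
--     )
-- ===== SOURCE B (Python) =====
-- def _depth_triples(depth: int) -> list[tuple[int, int, int]]:
--     # Enumerate only triples that contain depth-1, as a disjoint partition by the
--     # first axis that attains depth-1 (no cubic scan, no dedup needed).
--     d = depth - 1
--     triples = [(d, y, z) for y in range(depth) for z in range(depth)]
--     triples += [(x, d, z) for x in range(d) for z in range(depth)]
--     triples += [(x, y, d) for x in range(d) for y in range(d)]
--     return sorted(
--         triples,
--         key=lambda triple: (
--             triple[0] + triple[1] + triple[2],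
--             triple[0] != d,
--             triple[1] != d,
--             triple[2] != d,
--             triple[0],
--             triple[1],
--             triple[2],
--         ),
--     )
-- ===== Notes on version B (the rewrite author's own statement) =====
-- stated objective: faster
-- what changed: Instead of scanning the whole depth^3 cube and filtering triples whose max is depth-1, B enumerates only the three disjoint boundary faces (first coordinate equal to depth-1 partitioned by the first axis attaining it), then applies the same sort.
import Mathlib
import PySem

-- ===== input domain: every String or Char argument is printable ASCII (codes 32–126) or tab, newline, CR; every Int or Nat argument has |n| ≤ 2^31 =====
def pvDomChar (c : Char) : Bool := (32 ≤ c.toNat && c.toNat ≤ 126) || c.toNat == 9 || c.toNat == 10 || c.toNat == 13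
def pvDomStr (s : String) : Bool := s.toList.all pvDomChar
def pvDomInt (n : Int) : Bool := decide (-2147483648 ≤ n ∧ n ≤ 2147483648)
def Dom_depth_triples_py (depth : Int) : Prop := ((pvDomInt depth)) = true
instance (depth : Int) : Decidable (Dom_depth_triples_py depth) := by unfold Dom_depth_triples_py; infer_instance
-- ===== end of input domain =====

-- B replaces A's full depth^3 cube scan + max filter by a direct enumeration of the
-- three disjoint boundary faces of the cube (asymptotically faster generation), same sort.


-- ===== PORT A =====
-- A's sort key (the inline lambda): the Python 7-tuple (int, bool, bool, bool, int, int, int)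
-- ported as a 7-element Int list compared lexicographically, with False/True as 0/1 —
-- exactly Python's tuple comparison for same-length tuples of ints/bools.
def pvKeyA (depth : Int) (t : Int × Int × Int) : List Int :=
  [t.1 + t.2.1 + t.2.2,
   if t.1 ≠ depth - 1 then 1 else 0,
   if t.2.1 ≠ depth - 1 then 1 else 0,
   if t.2.2 ≠ depth - 1 then 1 else 0,
   t.1, t.2.1, t.2.2]

def depth_triples_py (depth : Int) : List (Int × Int × Int) :=
  let triples : List (Int × Int × Int) :=
    (PySem.List.pyRange 0 depth 1).foldl (fun acc cond_depth =>
      (PySem.List.pyRange 0 depth 1).foldl (fun acc then_depth =>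
        (PySem.List.pyRange 0 depth 1).foldl (fun acc else_depth =>
          if max cond_depth (max then_depth else_depth) ≠ depth - 1 then acc
          else acc ++ [(cond_depth, then_depth, else_depth)]) acc) acc) []
  PySem.List.sorted triples (pvKeyA depth)

-- ===== PORT B =====
-- B's sort key: same lambda, written over d = depth - 1 as in Source B.
def pvKeyB (d : Int) (t : Int × Int × Int) : List Int :=
  [t.1 + t.2.1 + t.2.2,
   if t.1 ≠ d then 1 else 0,
   if t.2.1 ≠ d then 1 else 0,
   if t.2.2 ≠ d then 1 else 0,
   t.1, t.2.1, t.2.2]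

def depth_triples_py_alt (depth : Int) : List (Int × Int × Int) :=
  let d := depth - 1
  let triples : List (Int × Int × Int) :=
    ((PySem.List.pyRange 0 depth 1).flatMap (fun y =>
        (PySem.List.pyRange 0 depth 1).map (fun z => (d, y, z))))
    ++ ((PySem.List.pyRange 0 d 1).flatMap (fun x =>
        (PySem.List.pyRange 0 depth 1).map (fun z => (x, d, z))))
    ++ ((PySem.List.pyRange 0 d 1).flatMap (fun x =>
        (PySem.List.pyRange 0 d 1).map (fun y => (x, y, d))))
  PySem.List.sorted triples (pvKeyB d)

-- ===== PRECONDITION & SPEC =====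
def Spec_depth_triples_py (depth : Int) (out : List (Int × Int × Int)) : Prop := out = depth_triples_py_alt depth
instance (depth : Int) (out : List (Int × Int × Int)) : Decidable (Spec_depth_triples_py depth out) := by unfold Spec_depth_triples_py; infer_instance

-- ===== CLAIM (what is proved, stated in full; the proofs are below) =====
def Claim_equal_depth_triples_py : Prop := ∀ (depth : Int), Dom_depth_triples_py depth → Spec_depth_triples_py depth (depth_triples_py depth)

-- ===== LEMMAS AND PROOFS =====

-- 'if P then acc else acc ++ [x]' loop = filter by ¬P
theorem pv_foldl_skip_if {α β : Type} (p : α → Prop) [DecidablePred p] (f : α → β)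
    (l : List α) (acc : List β) :
    l.foldl (fun acc x => if p x then acc else acc ++ [f x]) acc
      = acc ++ (l.filter (fun x => decide (¬ p x))).map f := by
  induction l generalizing acc with
  | nil => simp
  | cons x xs ih =>
      simp only [List.foldl_cons, List.filter_cons]
      by_cases h : p x
      · simp [h, ih]
      · simp [h, ih]

-- A's triple loop, written as nested flatMaps
def pvListA (depth : Int) : List (Int × Int × Int) :=
  (PySem.List.pyRange 0 depth 1).flatMap (fun c =>
    (PySem.List.pyRange 0 depth 1).flatMap (fun t =>
      ((PySem.List.pyRange 0 depth 1).filter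
        (fun e => decide (¬ max c (max t e) ≠ depth - 1))).map (fun e => (c, t, e))))

theorem pvListA_eq (depth : Int) :
    ((PySem.List.pyRange 0 depth 1).foldl (fun acc cond_depth =>
      (PySem.List.pyRange 0 depth 1).foldl (fun acc then_depth =>
        (PySem.List.pyRange 0 depth 1).foldl (fun acc else_depth =>
          if max cond_depth (max then_depth else_depth) ≠ depth - 1 then acc
          else acc ++ [(cond_depth, then_depth, else_depth)]) acc) acc) [])
      = pvListA depth := by
  unfold pvListA
  simp only [pv_foldl_skip_if, PySem.List.foldl_append_eq_flatMap, List.nil_append]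

-- B's three faces, as one name
def pvListB (depth : Int) : List (Int × Int × Int) :=
  ((PySem.List.pyRange 0 depth 1).flatMap (fun y =>
      (PySem.List.pyRange 0 depth 1).map (fun z => (depth - 1, y, z))))
  ++ ((PySem.List.pyRange 0 (depth - 1) 1).flatMap (fun x =>
      (PySem.List.pyRange 0 depth 1).map (fun z => (x, depth - 1, z))))
  ++ ((PySem.List.pyRange 0 (depth - 1) 1).flatMap (fun x =>
      (PySem.List.pyRange 0 (depth - 1) 1).map (fun y => (x, y, depth - 1))))

theorem pv_mem_A (depth c t e : Int) :
    (c, t, e) ∈ pvListA depth ↔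
      (0 ≤ c ∧ c < depth) ∧ (0 ≤ t ∧ t < depth) ∧ (0 ≤ e ∧ e < depth) ∧
        max c (max t e) = depth - 1 := by
  simp [pvListA, List.mem_flatMap, List.mem_map, List.mem_filter, PySem.List.mem_pyRange_one]

theorem pv_mem_B (depth c t e : Int) :
    (c, t, e) ∈ pvListB depth ↔
      (0 ≤ c ∧ c < depth) ∧ (0 ≤ t ∧ t < depth) ∧ (0 ≤ e ∧ e < depth) ∧
        max c (max t e) = depth - 1 := by
  simp [pvListB, List.mem_append, List.mem_flatMap, List.mem_map, PySem.List.mem_pyRange_one]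
  omega

theorem pv_nodup_A (depth : Int) : (pvListA depth).Nodup := by
  unfold pvListA
  rw [List.nodup_flatMap]
  refine ⟨fun c _ => ?_, ?_⟩
  · rw [List.nodup_flatMap]
    refine ⟨fun t _ => ?_, ?_⟩
    · exact ((PySem.List.nodup_pyRange_one 0 depth).filter _).map
        (fun a b h => by injection h with _ h; injection h)
    · refine (PySem.List.nodup_pyRange_one 0 depth).imp ?_
      rintro a b hab x hxa hxb
      simp only [List.mem_map, List.mem_filter] at hxa hxb
      obtain ⟨_, _, rfl⟩ := hxa
      obtain ⟨_, _, h⟩ := hxb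
      injection h with _ h; injection h with h _; exact hab h.symm
  · refine (PySem.List.nodup_pyRange_one 0 depth).imp ?_
    rintro a b hab x hxa hxb
    simp only [List.mem_flatMap, List.mem_map, List.mem_filter] at hxa hxb
    obtain ⟨_, _, _, _, rfl⟩ := hxa
    obtain ⟨_, _, _, _, h⟩ := hxb
    injection h with h _; exact hab h.symm

-- a rectangular face g y z over two ranges has no duplicates when g is injective
theorem pv_nodup_face {α : Type} (g : Int → Int → α)
    (hg : ∀ a b a' b', g a b = g a' b' → a = a' ∧ b = b') (p q : Int) :
    ((PySem.List.pyRange 0 p 1).flatMap (fun y =>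
      (PySem.List.pyRange 0 q 1).map (fun z => g y z))).Nodup := by
  rw [List.nodup_flatMap]
  refine ⟨fun y _ => (PySem.List.nodup_pyRange_one 0 q).map
      (fun a b h => ((hg _ _ _ _ h).2)), ?_⟩
  refine (PySem.List.nodup_pyRange_one 0 p).imp ?_
  rintro a b hab x hxa hxb
  simp only [List.mem_map] at hxa hxb
  obtain ⟨_, _, rfl⟩ := hxa
  obtain ⟨_, _, h⟩ := hxb
  exact hab (hg _ _ _ _ h).1.symm

theorem pv_nodup_B (depth : Int) : (pvListB depth).Nodup := by
  unfold pvListB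
  rw [List.nodup_append, List.nodup_append]
  refine ⟨⟨pv_nodup_face (fun y z => (depth - 1, y, z))
      (fun a b a' b' h => by injection h with _ h; injection h with h1 h2; exact ⟨h1, h2⟩) _ _,
    pv_nodup_face (fun x z => (x, depth - 1, z))
      (fun a b a' b' h => by injection h with h1 h; injection h with _ h2; exact ⟨h1, h2⟩) _ _,
    ?_⟩,
    pv_nodup_face (fun x y => (x, y, depth - 1))
      (fun a b a' b' h => by injection h with h1 h; injection h with h2 _; exact ⟨h1, h2⟩) _ _,
    ?_⟩
  · -- face 1 (first component = depth-1) never meets face 2 (first component < depth-1)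
    intro x hx y hy heq
    subst heq
    obtain ⟨c, t, e⟩ := x
    simp only [List.mem_flatMap, List.mem_map, PySem.List.mem_pyRange_one] at hx hy
    obtain ⟨a, ha, b, hb, h⟩ := hx
    obtain ⟨a', ha', b', hb', h'⟩ := hy
    injection h with h1 h; injection h with h2 h3
    injection h' with h1' h'; injection h' with h2' h3'
    omega
  · -- faces 1 and 2 never meet face 3
    intro x hx y hy heq
    subst heq
    obtain ⟨c, t, e⟩ := x
    simp only [List.mem_append, List.mem_flatMap, List.mem_map,
      PySem.List.mem_pyRange_one] at hx hy
    obtain ⟨a', ha', b', hb', h'⟩ := hy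
    injection h' with h1' h'; injection h' with h2' h3'
    rcases hx with ⟨a, ha, b, hb, h⟩ | ⟨a, ha, b, hb, h⟩ <;>
      (injection h with h1 h; injection h with h2 h3; omega)

theorem pv_key_inj (d : Int) : Function.Injective (pvKeyB d) := by
  rintro ⟨a1, a2, a3⟩ ⟨b1, b2, b3⟩ h
  simp only [pvKeyB, List.cons.injEq] at h
  obtain ⟨-, -, -, -, h1, h2, h3, -⟩ := h
  simp [h1, h2, h3]

theorem pv_perm (depth : Int) : (pvListA depth).Perm (pvListB depth) := by
  rw [List.perm_ext_iff_of_nodup (pv_nodup_A depth) (pv_nodup_B depth)]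
  rintro ⟨c, t, e⟩
  rw [pv_mem_A, pv_mem_B]

-- the lex linear order on List Int, named so the instances below are metavariable-free
@[reducible] def pvLO : LinearOrder (List Int) := List.instLinearOrder
@[reducible] def pvLT : LT (List Int) := pvLO.toPartialOrder.toPreorder.toLT
@[reducible] def pvDLT : @DecidableLT (List Int) pvLT := pvLO.toDecidableLT

-- the two LT instances on List Int (core's and the lex linear order's) decide the same
-- relation, so PySem.List.sorted is the same under either
theorem pv_sorted_bridge {α : Type} (i : LT (List Int)) (d : @DecidableLT (List Int) i)
    (h : ∀ u v : List Int, (@LT.lt _ i u v) ↔ List.Lex (fun a b : Int => a < b) u v)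
    (xs : List α) (key : α → List Int) :
    @PySem.List.sorted α (List Int) i d xs key false =
      @PySem.List.sorted α (List Int) pvLT pvDLT xs key false := by
  rw [@PySem.List.sorted_eq_foldl_insertBy α (List Int) i d,
      @PySem.List.sorted_eq_foldl_insertBy α (List Int) pvLT pvDLT]
  congr 1
  funext acc x
  congr 1
  funext a b
  refine decide_eq_decide.mpr ?_
  exact (h (key a) (key b)).trans Iff.rfl

-- ===== VERDICT (by name: the statement is the Claim_ definition above) =====
theorem depth_triples_py_spec : Claim_equal_depth_triples_py := by
  intro depth _
  unfold Spec_depth_triples_py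
  simp only [depth_triples_py, depth_triples_py_alt]
  rw [pvListA_eq]
  have hk : pvKeyA depth = pvKeyB (depth - 1) := rfl
  rw [hk]
  refine Eq.trans (pv_sorted_bridge _ _ ?_ _ _)
    (Eq.trans ?_ (Eq.symm (pv_sorted_bridge _ _ ?_ _ _)))
  · intro u v; first | exact Iff.rfl | exact List.lt_iff_lex_lt u v
  · exact @PySem.List.sorted_eq_sorted_of_perm _ _ pvLO (pvListA depth) (pvListB depth)
      (pvKeyB (depth - 1)) (pv_key_inj (depth - 1)) (pv_perm depth)
  · intro u v; first | exact Iff.rfl | exact List.lt_iff_lex_lt u v
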